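-- pv_equiv track=rewrite | github.com/dan-sazonov/olymp-playground | ЕГЭ/22/15930.py | f
-- ===== SOURCE A (Python) =====
-- def f(x):
--     a = 0
--     b = 1
--     while x > 0:
--         if x % 2 > 0:
--             a += x % 8
--         else:
--             b = b * (x % 8)
--         x = x // 8
--     return a, b
-- ===== SOURCE B (Python) =====
-- def f(x):
--     if x <= 0:
--         return 0, 1
--     digits = [int(c) for c in oct(x)[2:]]
--     a = sum(d for d in digits if d % 2 != 0)
--     b = 1
--     for d in digits:
--         if d % 2 == 0:
--             b *= d
--     return a, b
-- ===== Notes on version B (the rewrite author's own statement) =====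
-- stated objective: idiomatic
-- what changed: Replaces the divide-by-8 state-machine loop with building the octal digit list once from oct(x) and aggregating odd digits by a filtered sum and even digits by a product pass.
import Mathlib
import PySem

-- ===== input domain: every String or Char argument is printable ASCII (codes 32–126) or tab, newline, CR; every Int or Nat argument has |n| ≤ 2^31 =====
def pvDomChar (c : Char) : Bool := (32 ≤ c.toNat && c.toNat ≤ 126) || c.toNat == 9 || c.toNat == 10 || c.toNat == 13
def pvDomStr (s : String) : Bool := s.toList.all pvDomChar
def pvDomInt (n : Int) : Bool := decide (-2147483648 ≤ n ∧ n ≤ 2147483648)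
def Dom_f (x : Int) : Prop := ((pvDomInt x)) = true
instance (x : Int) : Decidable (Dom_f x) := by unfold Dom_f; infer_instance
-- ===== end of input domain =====

-- B replaces A's divide-by-8 accumulator loop with building the octal digit list once
-- and aggregating odd digits by a filtered sum and even digits by a product pass (idiomatic; same cost).

-- ===== PORT A =====
-- the while loop of A, state (x, a, b)
def fLoop (x a b : Int) : Int × Int :=
  if _hx : x > 0 then
    if PySem.Int.mod x 2 > 0 then
      fLoop (PySem.Int.floordiv x 8) (a + PySem.Int.mod x 8) b
    else
      fLoop (PySem.Int.floordiv x 8) a (b * PySem.Int.mod x 8)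
  else (a, b)
termination_by x.toNat
decreasing_by
  all_goals
    rw [PySem.Int.floordiv_eq_ediv_of_pos (by norm_num : (0:Int) < 8)]
    omega

def f (x : Int) : Int × Int := fLoop x 0 1

-- ===== PORT B =====
-- digits of oct(n) (n > 0), most significant first, as Ints
def octDigits (n : Nat) : List Int :=
  if n = 0 then [] else octDigits (n / 8) ++ [((n % 8 : Nat) : Int)]
termination_by n
decreasing_by exact Nat.div_lt_self (by omega) (by norm_num)

def f_alt (x : Int) : Int × Int :=
  if x ≤ 0 then (0, 1)
  else
    let digits := octDigits x.toNat
    let a := (digits.filter (fun d => PySem.Int.mod d 2 != 0)).sum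
    let b := digits.foldl (fun b d => if PySem.Int.mod d 2 == 0 then b * d else b) 1
    (a, b)

-- ===== PRECONDITION & SPEC =====
def Spec_f (x : Int) (out : Int × Int) : Prop := out = f_alt x
instance (x : Int) (out : Int × Int) : Decidable (Spec_f x out) := by unfold Spec_f; infer_instance

-- ===== CLAIM (what is proved, stated in full; the proofs are below) =====
def Claim_equal_f : Prop := ∀ (x : Int), Dom_f x → Spec_f x (f x)

-- ===== LEMMAS AND PROOFS =====

lemma octDigits_pos {n : Nat} (h : n ≠ 0) :
    octDigits n = octDigits (n / 8) ++ [((n % 8 : Nat) : Int)] := by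
  rw [octDigits]; simp [h]

lemma foldl_mul_filter (p : Int → Bool) (ds : List Int) (b : Int) :
    ds.foldl (fun b d => if p d then b * d else b) b = b * (ds.filter p).prod := by
  induction ds generalizing b with
  | nil => simp
  | cons d ds ih =>
    by_cases hp : p d <;> simp [List.foldl, hp, ih, mul_assoc]

lemma fLoop_spec (n : Nat) : ∀ (a b : Int),
    fLoop (n : Int) a b =
      (a + ((octDigits n).filter (fun d => PySem.Int.mod d 2 != 0)).sum,
       b * ((octDigits n).filter (fun d => PySem.Int.mod d 2 == 0)).prod) := by
  induction n using Nat.strong_induction_on with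
  | _ n ih =>
    intro a b
    rw [fLoop]
    by_cases h0 : n = 0
    · simp [h0, octDigits]
    · have hx : ((n : Int) > 0) := by omega
      have hdig : octDigits n = octDigits (n / 8) ++ [((n % 8 : Nat) : Int)] :=
        octDigits_pos h0
      have hfd : PySem.Int.floordiv (n : Int) 8 = ((n / 8 : Nat) : Int) := by
        rw [PySem.Int.floordiv_eq_ediv_of_pos (by norm_num : (0:Int) < 8)]
        omega
      have hmd : PySem.Int.mod (n : Int) 8 = ((n % 8 : Nat) : Int) := by
        rw [PySem.Int.mod_eq_emod_of_pos (by norm_num : (0:Int) < 8)]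
        omega
      have hm2 : PySem.Int.mod (n : Int) 2 = ((n % 2 : Nat) : Int) := by
        rw [PySem.Int.mod_eq_emod_of_pos (by norm_num : (0:Int) < 2)]
        omega
      have hm82 : PySem.Int.mod (((n % 8 : Nat) : Int)) 2 = ((n % 8 % 2 : Nat) : Int) := by
        rw [PySem.Int.mod_eq_emod_of_pos (by norm_num : (0:Int) < 2)]
        omega
      have hlt : n / 8 < n := Nat.div_lt_self (by omega) (by norm_num)
      by_cases hodd : n % 2 = 1
      · have hcond : PySem.Int.mod (n : Int) 2 > 0 := by rw [hm2]; omega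
        have h82 : n % 8 % 2 = 1 := by omega
        have e1 : List.filter (fun d => PySem.Int.mod d 2 != 0) [((n % 8 : Nat) : Int)]
            = [((n % 8 : Nat) : Int)] := by
          rw [List.filter, hm82, h82]; rfl
        have e2 : List.filter (fun d => PySem.Int.mod d 2 == 0) [((n % 8 : Nat) : Int)]
            = [] := by
          rw [List.filter, hm82, h82]; rfl
        simp only [hx, hcond, dif_pos, if_pos]
        rw [hfd, hmd, ih _ hlt, hdig, List.filter_append, List.filter_append, e1, e2]
        simp only [List.sum_append, List.prod_append, List.sum_cons, List.sum_nil,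
          List.prod_cons, List.prod_nil]
        refine Prod.ext ?_ ?_ <;> dsimp only <;> ring
      · have hcond : ¬ PySem.Int.mod (n : Int) 2 > 0 := by rw [hm2]; omega
        have h82 : n % 8 % 2 = 0 := by omega
        have e1 : List.filter (fun d => PySem.Int.mod d 2 != 0) [((n % 8 : Nat) : Int)]
            = [] := by
          rw [List.filter, hm82, h82]; rfl
        have e2 : List.filter (fun d => PySem.Int.mod d 2 == 0) [((n % 8 : Nat) : Int)]
            = [((n % 8 : Nat) : Int)] := by
          rw [List.filter, hm82, h82]; rfl
        simp only [hx, hcond, dif_pos, if_false]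
        rw [hfd, hmd, ih _ hlt, hdig, List.filter_append, List.filter_append, e1, e2]
        simp only [List.sum_append, List.prod_append, List.sum_nil,
          List.prod_cons, List.prod_nil]
        refine Prod.ext ?_ ?_ <;> dsimp only <;> ring

-- ===== VERDICT (by name: the statement is the Claim_ definition above) =====
theorem f_spec : Claim_equal_f := by
  intro x _
  unfold Spec_f f f_alt
  by_cases hx : x ≤ 0
  · rw [fLoop]
    simp [hx, show ¬ x > 0 by omega]
  · have hn : ((x.toNat : Nat) : Int) = x := Int.toNat_of_nonneg (by omega)
    rw [if_neg hx]
    simp only [foldl_mul_filter]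
    conv_lhs => rw [← hn]
    rw [fLoop_spec]
    simp
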